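-- pv_equiv track=rewrite | github.com/Minji-Lee-99/algorithm | 1959.py | find_max_total
-- ===== SOURCE A (Python) =====
-- def find_max_total(N, M, A, B):
--     max_total = 0
--     #A, B리스트의 길이 차이 + 1만큼 반복(가능한 모든 경우의 수를 판단)
--     for i in range(M - N + 1):
--         total = 0
--         for j in range(len(A)):
--             total += (A[j] * B[i + j])
--         if max_total < total:
--             max_total = total
--     return max_total
-- ===== SOURCE B (Python) =====
-- def find_max_total(N, M, A, B):
--     K = M - N + 1
--     if K <= 0 or not A:
--         return 0
--     totals = [0] * K
--     for j in range(len(A)):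
--         aj = A[j]
--         for i in range(K):
--             totals[i] += aj * B[i + j]
--     return max(0, max(totals))
-- ===== Notes on version B (the rewrite author's own statement) =====
-- stated objective: alternative
-- what changed: B builds all window dot products simultaneously, column by column (outer loop over positions j of A, accumulating into a totals array of one slot per window), then takes max(0, max(totals)), instead of A's one-window-at-a-time running maximum.
import Mathlib
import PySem

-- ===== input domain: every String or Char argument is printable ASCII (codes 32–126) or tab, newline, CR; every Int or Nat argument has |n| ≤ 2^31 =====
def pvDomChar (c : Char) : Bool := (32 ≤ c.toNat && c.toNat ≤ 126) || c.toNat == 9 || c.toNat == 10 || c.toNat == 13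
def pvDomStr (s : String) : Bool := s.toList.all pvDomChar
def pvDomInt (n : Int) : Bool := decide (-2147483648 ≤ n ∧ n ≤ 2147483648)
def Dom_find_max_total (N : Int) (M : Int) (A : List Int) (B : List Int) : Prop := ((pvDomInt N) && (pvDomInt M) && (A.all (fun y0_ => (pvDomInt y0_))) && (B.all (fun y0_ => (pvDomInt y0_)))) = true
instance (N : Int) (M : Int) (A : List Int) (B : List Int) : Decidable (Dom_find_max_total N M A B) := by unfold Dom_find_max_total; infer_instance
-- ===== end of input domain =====

-- B builds every window's dot product at once, column by column, in a totals array; A scans one window at a time.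
-- Same asymptotic cost; equivalence of the two loop orders is what is proved.

-- ===== PORT A =====
def find_max_total (N : Int) (M : Int) (A : List Int) (B : List Int) : Int :=
  (PySem.List.pyRange 0 (M - N + 1) 1).foldl
    (fun max_total i =>
      let total := (PySem.List.pyRange 0 (A.length : Int) 1).foldl
        (fun total j => total + PySem.List.pyGetD A j 0 * PySem.List.pyGetD B (i + j) 0) 0
      if max_total < total then total else max_total) 0

-- ===== PORT B =====
def find_max_total_alt (N : Int) (M : Int) (A : List Int) (B : List Int) : Int :=
  let K := M - N + 1
  if K ≤ 0 ∨ A = [] then 0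
  else
    let totals0 : List Int := List.replicate K.toNat 0
    let totals := (PySem.List.pyRange 0 (A.length : Int) 1).foldl
      (fun totals j =>
        let aj := PySem.List.pyGetD A j 0
        (PySem.List.pyRange 0 K 1).foldl
          (fun acc i =>
            PySem.List.pySetD acc i (PySem.List.pyGetD acc i 0 + aj * PySem.List.pyGetD B (i + j) 0))
          totals)
      totals0
    max 0 (PySem.List.maxD totals (fun x => x) 0)

-- ===== PRECONDITION & SPEC =====
-- Pre_ excludes exactly the inputs where A raises IndexError (B[i+j] out of range in some window).
def Pre_find_max_total (N : Int) (M : Int) (A : List Int) (B : List Int) : Prop :=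
  M - N + 1 ≤ 0 ∨ A = [] ∨ M - N + (A.length : Int) ≤ (B.length : Int)
instance (N : Int) (M : Int) (A : List Int) (B : List Int) : Decidable (Pre_find_max_total N M A B) := by unfold Pre_find_max_total; infer_instance
def pvWitness_find_max_total : Int × Int × List Int × List Int := (2, 3, [1, 2], [3, -4, 5])

def Spec_find_max_total (N : Int) (M : Int) (A : List Int) (B : List Int) (out : Int) : Prop := out = find_max_total_alt N M A B
instance (N : Int) (M : Int) (A : List Int) (B : List Int) (out : Int) : Decidable (Spec_find_max_total N M A B out) := by unfold Spec_find_max_total; infer_instance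

-- ===== CLAIM (what is proved, stated in full; the proofs are below) =====
def Claim_equal_find_max_total : Prop := ∀ (N : Int) (M : Int) (A : List Int) (B : List Int), Dom_find_max_total N M A B → Pre_find_max_total N M A B → Spec_find_max_total N M A B (find_max_total N M A B)

-- ===== LEMMAS AND PROOFS =====

-- the dot product of A with the window of B starting at i
def pvDot (A B : List Int) (i : Int) : Int :=
  ((PySem.List.pyRange 0 (A.length : Int) 1).map
    (fun j => PySem.List.pyGetD A j 0 * PySem.List.pyGetD B (i + j) 0)).sum

theorem pv_mapIdx_id (l : List Int) : l.mapIdx (fun _ x => x) = l := by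
  induction l with
  | nil => rfl
  | cons x t ih => simp [List.mapIdx_cons, ih]

-- one in-place pass 'for i in range(len ts): ts[i] += g i' as a mapIdx
theorem pv_pass_gen (g : Int → Int) : ∀ (ts pre : List Int),
    (PySem.List.pyRange (pre.length : Int) ((pre.length : Int) + (ts.length : Int)) 1).foldl
      (fun acc i => PySem.List.pySetD acc i (PySem.List.pyGetD acc i 0 + g i)) (pre ++ ts)
    = pre ++ ts.mapIdx (fun p x => x + g ((pre.length : Int) + (p : Int))) := by
  intro ts
  induction ts with
  | nil =>
    intro pre
    simp only [List.length_nil, Nat.cast_zero, add_zero, List.mapIdx_nil, List.append_nil]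
    rw [PySem.List.pyRange_one_eq_nil le_rfl]
    rfl
  | cons x rest ih =>
    intro pre
    rw [PySem.List.pyRange_one_cons (by simp only [List.length_cons]; push_cast; omega)]
    simp only [List.foldl_cons]
    have hget : PySem.List.pyGetD (pre ++ x :: rest) (pre.length : Int) 0 = x := by
      simp [List.getD]
    have hset : PySem.List.pySetD (pre ++ x :: rest) (pre.length : Int) (x + g (pre.length : Int))
        = pre ++ (x + g (pre.length : Int)) :: rest := by
      simp
    rw [hget, hset]
    have h2 : (pre ++ (x + g (pre.length : Int)) :: rest)
        = (pre ++ [x + g (pre.length : Int)]) ++ rest := by simp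
    have hlen : ((pre ++ [x + g (pre.length : Int)]).length : Int) = (pre.length : Int) + 1 := by
      simp
    have hb : (pre.length : Int) + ((x :: rest).length : Int)
        = ((pre ++ [x + g (pre.length : Int)]).length : Int) + (rest.length : Int) := by
      simp only [List.length_cons, List.length_append, List.length_nil]
      push_cast; ring
    rw [h2, hb, ← hlen]
    rw [ih (pre ++ [x + g (pre.length : Int)])]
    simp only [hlen, List.mapIdx_cons, List.append_assoc, List.singleton_append,
      Nat.cast_zero, add_zero, Nat.cast_add, Nat.cast_one]
    congr 2
    congr 1
    funext p y
    congr 2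
    ring

-- the whole double loop of B: each slot p accumulates the column sum over js
theorem pv_outer (gf : Int → Int → Int) (K : Int) (js : List Int) : ∀ (ts : List Int), ts.length = K.toNat →
    js.foldl
      (fun ts j =>
        (PySem.List.pyRange 0 K 1).foldl
          (fun acc i => PySem.List.pySetD acc i (PySem.List.pyGetD acc i 0 + gf j i)) ts) ts
    = ts.mapIdx (fun p x => x + (js.map (fun j => gf j (p : Int))).sum) := by
  induction js with
  | nil =>
    intro ts _
    simp [pv_mapIdx_id ts]
  | cons j js ih =>
    intro ts h
    have hr : PySem.List.pyRange 0 K 1 = PySem.List.pyRange 0 (ts.length : Int) 1 := by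
      rw [PySem.List.pyRange_one, PySem.List.pyRange_one]
      congr 2
      omega
    have hpass : (PySem.List.pyRange 0 K 1).foldl
        (fun acc i => PySem.List.pySetD acc i (PySem.List.pyGetD acc i 0 + gf j i)) ts
        = ts.mapIdx (fun p x => x + gf j (p : Int)) := by
      rw [hr]
      have := pv_pass_gen (fun i => gf j i) ts []
      simpa using this
    simp only [List.foldl_cons]
    rw [hpass]
    rw [ih _ (by simp [h])]
    rw [List.mapIdx_mapIdx]
    congr 1
    funext p x
    simp only [Function.comp_apply, List.map_cons, List.sum_cons]
    ring

-- A's running 'if max_total < total' loop is a fold of max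
theorem pv_foldl_ite_max {α : Type} (f : α → Int) (l : List α) (a : Int) :
    l.foldl (fun m i => if m < f i then f i else m) a = l.foldl (fun m i => max m (f i)) a := by
  induction l generalizing a with
  | nil => rfl
  | cons x t ih =>
    simp only [List.foldl_cons]
    rw [ih]
    congr 1
    rcases lt_or_ge a (f x) with h | h
    · simp [h, max_eq_right (le_of_lt h)]
    · simp [not_lt.mpr h, max_eq_left h]

theorem pv_foldl_max_max (t : List Int) : ∀ (a b : Int), t.foldl max (max a b) = max a (t.foldl max b) := by
  induction t with
  | nil => intro a b; rfl
  | cons c t ih =>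
    intro a b
    simp only [List.foldl_cons]
    rw [max_assoc, ih]

-- A as a fold of max over the window dot products
theorem pv_A_eq (N M : Int) (A B : List Int) :
    find_max_total N M A B
    = ((List.range (M - N + 1).toNat).map (fun p : Nat => pvDot A B (p : Int))).foldl max 0 := by
  unfold find_max_total
  rw [PySem.List.pyRange_one 0 (M - N + 1)]
  simp only [sub_zero, List.foldl_map, zero_add]
  have h1 : ∀ (i : Int),
      (PySem.List.pyRange 0 (A.length : Int) 1).foldl
        (fun total j => total + PySem.List.pyGetD A j 0 * PySem.List.pyGetD B (i + j) 0) 0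
      = pvDot A B i := by
    intro i
    rw [PySem.List.foldl_add]
    simp [pvDot]
  simp only [h1]
  rw [pv_foldl_ite_max (fun k : Nat => pvDot A B (k : Int))]

-- ===== VERDICT (by name: the statement is the Claim_ definition above) =====
theorem find_max_total_spec : Claim_equal_find_max_total := by
  intro N M A B _ _
  unfold Spec_find_max_total
  by_cases hK : M - N + 1 ≤ 0 ∨ A = []
  · rw [show find_max_total_alt N M A B = 0 from by unfold find_max_total_alt; rw [if_pos hK]]
    rw [pv_A_eq]
    rcases hK with hK | hA
    · have : (M - N + 1).toNat = 0 := by omega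
      simp [this]
    · subst hA
      have hd : ∀ p : Nat, pvDot [] B (p : Int) = 0 := by
        intro p; simp [pvDot]
      generalize (List.range (M - N + 1).toNat) = l
      induction l with
      | nil => rfl
      | cons x t ih =>
        rw [List.map_cons, List.foldl_cons, hd x]
        simpa using ih
  · have hzeta : find_max_total_alt N M A B
        = max 0 (PySem.List.maxD
            ((PySem.List.pyRange 0 (A.length : Int) 1).foldl
              (fun totals j =>
                (PySem.List.pyRange 0 (M - N + 1) 1).foldl
                  (fun acc i => PySem.List.pySetD acc i
                    (PySem.List.pyGetD acc i 0 + PySem.List.pyGetD A j 0 * PySem.List.pyGetD B (i + j) 0))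
                  totals)
              (List.replicate (M - N + 1).toNat 0))
            (fun x => x) 0) := by
      unfold find_max_total_alt
      rw [if_neg hK]
    rw [hzeta]
    rw [not_or] at hK
    obtain ⟨hKpos, _⟩ := hK
    rw [pv_outer (fun j i => PySem.List.pyGetD A j 0 * PySem.List.pyGetD B (i + j) 0)
      (M - N + 1) (PySem.List.pyRange 0 (A.length : Int) 1)
      (List.replicate (M - N + 1).toNat 0) (by simp)]
    have hmap : (List.replicate (M - N + 1).toNat (0 : Int)).mapIdx
        (fun p x => x + ((PySem.List.pyRange 0 (A.length : Int) 1).map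
          (fun j => PySem.List.pyGetD A j 0 * PySem.List.pyGetD B ((p : Int) + j) 0)).sum)
        = (List.range (M - N + 1).toNat).map (fun p : Nat => pvDot A B (p : Int)) := by
      apply List.ext_getElem
      · simp
      · intro i h1 h2
        simp only [List.getElem_mapIdx, List.getElem_replicate, List.getElem_map,
          List.getElem_range, pvDot, zero_add]
    rw [hmap, pv_A_eq]
    have hnpos : 0 < (M - N + 1).toNat := by omega
    obtain ⟨x, t, hxt⟩ : ∃ x t,
        (List.range (M - N + 1).toNat).map (fun p : Nat => pvDot A B (p : Int)) = x :: t := by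
      cases hl : (List.range (M - N + 1).toNat).map (fun p : Nat => pvDot A B (p : Int)) with
      | nil => exfalso; have := congrArg List.length hl; simp at this; omega
      | cons x t => exact ⟨x, t, rfl⟩
    rw [hxt]
    simp only [List.foldl_cons]
    rw [pv_foldl_max_max t 0 x]
    unfold PySem.List.maxD
    rw [PySem.List.max?_id_cons]
    rfl
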